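-- pv_equiv track=rewrite | github.com/astrocinco/2c2023-TDA1-TP1 | solutions.py | get_analisis_duration
-- ===== SOURCE A (Python) =====
-- SCALONI_INDEX = 0
--
-- ASSISTANT_INDEX = 1
--
-- def get_analisis_duration(analisis_order):
--     team_analisis_max_duration = 0
--     scaloni_wait_time = 0
--     for team in analisis_order:
--         scaloni_wait_time += team[SCALONI_INDEX]
--         if scaloni_wait_time + team[ASSISTANT_INDEX] > team_analisis_max_duration:
--             team_analisis_max_duration = scaloni_wait_time + team[ASSISTANT_INDEX]
--     return team_analisis_max_duration
-- ===== SOURCE B (Python) =====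
-- SCALONI_INDEX = 0
--
-- ASSISTANT_INDEX = 1
--
-- def get_analisis_duration(analisis_order):
--     # Backward scan: addition distributes over max, so the maximum completion
--     # time M satisfies M(t::rest) = t[0] + max(t[1], M(rest)); no prefix sums
--     # and no running maximum are ever materialised. Result floored at 0.
--     best = None
--     for team in reversed(analisis_order):
--         contribution = team[ASSISTANT_INDEX] if best is None else max(team[ASSISTANT_INDEX], best)
--         best = team[SCALONI_INDEX] + contribution
--     return 0 if best is None else max(0, best)
-- ===== Notes on version B (the rewrite author's own statement) =====
-- stated objective: alternative
-- what changed: Replaces A's forward scan maintaining a running prefix sum and running maximum with a backward traversal that uses distributivity of addition over max (M(t::rest) = t[0] + max(t[1], M(rest))), maintaining a single optional 'best suffix value' and flooring at 0 only at the end.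
import Mathlib
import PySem

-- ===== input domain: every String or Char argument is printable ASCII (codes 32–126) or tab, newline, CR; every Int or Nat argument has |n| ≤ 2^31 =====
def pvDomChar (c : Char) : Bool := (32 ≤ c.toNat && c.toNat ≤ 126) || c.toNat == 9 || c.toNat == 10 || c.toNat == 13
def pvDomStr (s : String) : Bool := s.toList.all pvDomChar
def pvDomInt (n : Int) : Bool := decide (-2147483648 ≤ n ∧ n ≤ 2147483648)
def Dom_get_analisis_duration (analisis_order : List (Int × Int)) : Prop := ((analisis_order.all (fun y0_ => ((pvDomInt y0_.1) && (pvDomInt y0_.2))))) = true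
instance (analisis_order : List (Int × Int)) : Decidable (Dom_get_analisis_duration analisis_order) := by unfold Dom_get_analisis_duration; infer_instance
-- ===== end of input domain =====

-- B traverses the list backwards using distributivity of + over max, keeping one optional accumulator; same O(n) cost, different algorithm.

-- ===== PORT A =====
-- one forward scan carrying (running max, running scaloni wait)
def get_analisis_duration (analisis_order : List (Int × Int)) : Int :=
  (analisis_order.foldl
    (fun (s : Int × Int) team =>
      let scaloni_wait_time := s.2 + team.1
      let team_analisis_max_duration :=
        if scaloni_wait_time + team.2 > s.1 then scaloni_wait_time + team.2 else s.1
      (team_analisis_max_duration, scaloni_wait_time))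
    (0, 0)).1

-- ===== PORT B =====
-- Source B's loop 'for team in reversed(analisis_order)' with accumulator best : Option Int
def get_analisis_duration_alt (analisis_order : List (Int × Int)) : Int :=
  let best :=
    analisis_order.reverse.foldl
      (fun (best : Option Int) team =>
        let contribution := match best with | none => team.2 | some b => max team.2 b
        some (team.1 + contribution))
      none
  match best with
  | none => 0
  | some b => max 0 b

-- ===== PRECONDITION & SPEC =====
def Spec_get_analisis_duration (analisis_order : List (Int × Int)) (out : Int) : Prop := out = get_analisis_duration_alt analisis_order
instance (analisis_order : List (Int × Int)) (out : Int) : Decidable (Spec_get_analisis_duration analisis_order out) := by unfold Spec_get_analisis_duration; infer_instance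

-- ===== CLAIM (what is proved, stated in full; the proofs are below) =====
def Claim_equal_get_analisis_duration : Prop := ∀ (analisis_order : List (Int × Int)), Dom_get_analisis_duration analisis_order → Spec_get_analisis_duration analisis_order (get_analisis_duration analisis_order)

-- ===== LEMMAS AND PROOFS =====

-- the optional maximum completion time, recursively from the left
def pvM : List (Int × Int) → Option Int
  | [] => none
  | t :: ts =>
      some (t.1 + (match pvM ts with | none => t.2 | some b => max t.2 b))

-- B's backward foldl computes pvM
lemma alt_fold_eq_pvM (xs : List (Int × Int)) :
    xs.reverse.foldl
      (fun (best : Option Int) team =>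
        let contribution := match best with | none => team.2 | some b => max team.2 b
        some (team.1 + contribution))
      none = pvM xs := by
  induction xs with
  | nil => simp [pvM]
  | cons t ts ih =>
      simp only [List.reverse_cons, List.foldl_append, List.foldl_cons, List.foldl_nil, ih, pvM]

-- reference list of completion times with the scaloni wait starting at w
def pvRun (w : Int) : List (Int × Int) → List Int
  | [] => []
  | t :: ts => (w + t.1 + t.2) :: pvRun (w + t.1) ts

-- A's fold is the max over pvRun
lemma foldA_eq (xs : List (Int × Int)) : ∀ (m w : Int),
    (xs.foldl
      (fun (s : Int × Int) team =>
        let scaloni_wait_time := s.2 + team.1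
        let team_analisis_max_duration :=
          if scaloni_wait_time + team.2 > s.1 then scaloni_wait_time + team.2 else s.1
        (team_analisis_max_duration, scaloni_wait_time))
      (m, w)).1 = (pvRun w xs).foldl max m := by
  induction xs with
  | nil => intro m w; simp [pvRun]
  | cons t ts ih =>
      intro m w
      simp only [List.foldl_cons, pvRun]
      rw [ih]
      congr 1
      omega

-- the max over pvRun in terms of pvM
lemma run_max_eq_pvM (xs : List (Int × Int)) : ∀ (m w : Int),
    (pvRun w xs).foldl max m = match pvM xs with | none => m | some b => max m (w + b) := by
  induction xs with
  | nil => intro m w; simp [pvRun, pvM]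
  | cons t ts ih =>
      intro m w
      simp only [pvRun, pvM, List.foldl_cons]
      rw [ih]
      cases pvM ts with
      | none => simp [Int.add_assoc]
      | some b => simp only [Int.add_assoc, ← max_add_add_left, max_assoc]

-- ===== VERDICT (by name: the statement is the Claim_ definition above) =====
theorem get_analisis_duration_spec : Claim_equal_get_analisis_duration := by
  intro xs _
  unfold Spec_get_analisis_duration get_analisis_duration get_analisis_duration_alt
  rw [foldA_eq xs 0 0, run_max_eq_pvM xs 0 0, alt_fold_eq_pvM xs]
  cases pvM xs with
  | none => rfl
  | some b => simp
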